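-- pv_equiv track=rewrite | github.com/maisamkhorshidi/gp_package | genforge/gp_copydetect.py | gp_copydetect
-- ===== SOURCE A (Python) =====
-- from collections import Counter
--
-- def gp_copydetect(new_pop, parent, id_pop):
--     identify_copy = False
--     parent_counter = Counter(parent)  # Count the elements in the parent list
--
--     for id_ind in range(len(new_pop[id_pop])):
--         if new_pop[id_pop][id_ind] is not None:
--             new_individual_counter = Counter(new_pop[id_pop][id_ind])  # Count the elements in the new individual
--             if parent_counter == new_individual_counter:  # Compare the element counts
--                 identify_copy = True
--                 break
--
--     return identify_copy
-- ===== SOURCE B (Python) =====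
-- def gp_copydetect(new_pop, parent, id_pop):
--     # Build a hash index of the multiset signatures of all non-None individuals,
--     # then answer with a single membership lookup of the parent's signature.
--     signatures = {tuple(sorted(ind)) for ind in new_pop[id_pop] if ind is not None}
--     return tuple(sorted(parent)) in signatures
-- ===== Notes on version B (the rewrite author's own statement) =====
-- stated objective: alternative
-- what changed: Instead of scanning with a flag and breaking on the first per-individual Counter comparison, B builds a set (hash index) of sorted-tuple signatures of all individuals in one comprehension and decides the answer by a single membership test of the parent's signature.
import Mathlib
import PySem

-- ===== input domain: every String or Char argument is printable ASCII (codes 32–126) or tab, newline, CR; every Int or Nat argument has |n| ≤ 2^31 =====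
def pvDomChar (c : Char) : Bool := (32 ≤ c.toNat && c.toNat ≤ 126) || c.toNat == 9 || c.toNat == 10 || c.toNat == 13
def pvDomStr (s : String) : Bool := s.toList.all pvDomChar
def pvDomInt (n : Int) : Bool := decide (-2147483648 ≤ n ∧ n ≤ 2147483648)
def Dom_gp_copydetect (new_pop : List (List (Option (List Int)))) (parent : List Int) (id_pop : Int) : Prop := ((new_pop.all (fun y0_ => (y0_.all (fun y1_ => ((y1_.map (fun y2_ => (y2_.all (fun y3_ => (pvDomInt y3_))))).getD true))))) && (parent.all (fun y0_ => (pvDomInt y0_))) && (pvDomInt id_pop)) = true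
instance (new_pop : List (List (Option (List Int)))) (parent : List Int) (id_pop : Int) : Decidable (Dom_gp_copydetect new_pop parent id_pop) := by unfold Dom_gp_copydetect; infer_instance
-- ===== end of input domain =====

-- B replaces A's flag-and-break Counter scan by a set (hash index) of sorted signatures built in one pass, answered by a single membership lookup; alternative algorithm, same behaviour.


-- ===== PORT A =====
-- Python's `Counter == Counter` compares as unordered dicts; counters built from lists have
-- no zero counts, so equality is: every key of either side has equal counts on both sides.
def counterEq (pc nc : PySem.Dict Int Int) : Bool :=
  pc.keys.all (fun k => pc.getD k 0 == nc.getD k 0) &&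
  nc.keys.all (fun k => pc.getD k 0 == nc.getD k 0)

-- A's `for id_ind in range(len(new_pop[id_pop]))` loop with flag and break, element by element.
def gpLoopA (pc : PySem.Dict Int Int) : List (Option (List Int)) → Bool
  | [] => false
  | ind :: rest =>
    match ind with
    | none => gpLoopA pc rest
    | some l => if counterEq pc (PySem.Dict.counter l) then true else gpLoopA pc rest

def gp_copydetect (new_pop : List (List (Option (List Int)))) (parent : List Int) (id_pop : Int) : Bool :=
  gpLoopA (PySem.Dict.counter parent) (PySem.List.pyGetD new_pop id_pop [])

-- ===== PORT B =====
-- set comprehension: set of sorted signatures of the non-None individuals, then one membership test.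
def gp_copydetect_alt (new_pop : List (List (Option (List Int)))) (parent : List Int) (id_pop : Int) : Bool :=
  let signatures : PySem.Set (List Int) :=
    PySem.Set.ofList ((PySem.List.pyGetD new_pop id_pop []).filterMap
      (fun ind => ind.map (fun l => PySem.List.sorted l (fun x => x) false)))
  PySem.Set.contains signatures (PySem.List.sorted parent (fun x => x) false)

-- ===== PRECONDITION & SPEC =====
-- Pre_ excludes only id_pop out of range of new_pop (Python negative-index rules), where A raises IndexError.
def Pre_gp_copydetect (new_pop : List (List (Option (List Int)))) (parent : List Int) (id_pop : Int) : Prop :=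
  PySem.Raise.InRange new_pop.length id_pop
instance (new_pop : List (List (Option (List Int)))) (parent : List Int) (id_pop : Int) : Decidable (Pre_gp_copydetect new_pop parent id_pop) := by unfold Pre_gp_copydetect; infer_instance
def pvWitness_gp_copydetect : List (List (Option (List Int))) × List Int × Int := ([[some [1, 2], none]], [2, 1], 0)

def Spec_gp_copydetect (new_pop : List (List (Option (List Int)))) (parent : List Int) (id_pop : Int) (out : Bool) : Prop := out = gp_copydetect_alt new_pop parent id_pop
instance (new_pop : List (List (Option (List Int)))) (parent : List Int) (id_pop : Int) (out : Bool) : Decidable (Spec_gp_copydetect new_pop parent id_pop out) := by unfold Spec_gp_copydetect; infer_instance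

-- ===== CLAIM (what is proved, stated in full; the proofs are below) =====
def Claim_equal_gp_copydetect : Prop := ∀ (new_pop : List (List (Option (List Int)))) (parent : List Int) (id_pop : Int), Dom_gp_copydetect new_pop parent id_pop → Pre_gp_copydetect new_pop parent id_pop → Spec_gp_copydetect new_pop parent id_pop (gp_copydetect new_pop parent id_pop)

-- ===== LEMMAS AND PROOFS =====

-- Counter equality of two lists is multiset equality (permutation).
theorem counterEq_iff_perm (xs ys : List Int) :
    counterEq (PySem.Dict.counter xs) (PySem.Dict.counter ys) = true ↔ xs.Perm ys := by
  simp only [counterEq, Bool.and_eq_true, List.all_eq_true, PySem.Dict.keys_counter,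
    PySem.Dict.getD_counter, beq_iff_eq]
  constructor
  · rintro ⟨h1, h2⟩
    rw [List.perm_iff_count]
    intro v
    by_cases hx : v ∈ xs
    · exact_mod_cast h1 v (by simp [PySem.Set.mem_ofList, hx])
    · by_cases hy : v ∈ ys
      · exact_mod_cast h2 v (by simp [PySem.Set.mem_ofList, hy])
      · rw [List.count_eq_zero_of_not_mem hx, List.count_eq_zero_of_not_mem hy]
  · intro h
    exact ⟨fun v _ => by exact_mod_cast h.count_eq v, fun v _ => by exact_mod_cast h.count_eq v⟩

-- Sorted-list equality of two lists is also multiset equality.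
theorem sorted_eq_iff_perm (xs ys : List Int) :
    PySem.List.sorted xs (fun x => x) false = PySem.List.sorted ys (fun x => x) false ↔ xs.Perm ys := by
  constructor
  · intro h
    exact ((PySem.List.sorted_perm xs (fun x => x) false).symm.trans
      (h ▸ PySem.List.sorted_perm ys (fun x => x) false))
  · intro h
    exact (PySem.List.sorted_id_eq_of_perm_of_pairwise xs (PySem.List.sorted ys (fun x => x) false)
      ((PySem.List.sorted_perm ys (fun x => x) false).trans h.symm)
      (PySem.List.sorted_pairwise ys (fun x => x)))

-- A's flag loop returns true iff some non-None individual is a permutation of the parent.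
theorem gpLoopA_true_iff (parent : List Int) (row : List (Option (List Int))) :
    gpLoopA (PySem.Dict.counter parent) row = true ↔ ∃ l, some l ∈ row ∧ l.Perm parent := by
  induction row with
  | nil => simp [gpLoopA]
  | cons ind rest ih =>
    cases ind with
    | none => simp [gpLoopA, ih]
    | some l =>
      simp only [gpLoopA]
      by_cases h : l.Perm parent
      · have hc : counterEq (PySem.Dict.counter parent) (PySem.Dict.counter l) = true :=
          (counterEq_iff_perm parent l).mpr h.symm
        simp only [hc, if_true]
        constructor
        · intro _; exact ⟨l, by simp, h⟩
        · intro _; trivial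
      · have hc : counterEq (PySem.Dict.counter parent) (PySem.Dict.counter l) = false := by
          by_contra hne
          exact h (((counterEq_iff_perm parent l).mp (by simpa using hne)).symm)
        simp only [hc, Bool.false_eq_true, if_false, ih]
        constructor
        · rintro ⟨m, hm, hp⟩; exact ⟨m, by simp [hm], hp⟩
        · rintro ⟨m, hm, hp⟩
          rcases List.mem_cons.mp hm with he | hmem
          · exact absurd (by injection he with he'; exact he' ▸ hp) h
          · exact ⟨m, hmem, hp⟩

-- B's signature-set lookup returns true under the same condition.
theorem alt_true_iff (parent : List Int) (row : List (Option (List Int))) :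
    (PySem.Set.contains (PySem.Set.ofList (row.filterMap
        (fun ind => ind.map (fun l => PySem.List.sorted l (fun x => x) false))))
      (PySem.List.sorted parent (fun x => x) false)) = true ↔
      ∃ l, some l ∈ row ∧ l.Perm parent := by
  simp only [PySem.Set.contains_iff, PySem.Set.mem_ofList, List.mem_filterMap,
    Option.map_eq_some_iff]
  constructor
  · rintro ⟨ind, hmem, l, rfl, hs⟩
    exact ⟨l, hmem, (sorted_eq_iff_perm l parent).mp hs⟩
  · rintro ⟨l, hmem, hp⟩
    exact ⟨some l, hmem, l, rfl, (sorted_eq_iff_perm l parent).mpr hp⟩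

-- ===== VERDICT (by name: the statement is the Claim_ definition above) =====
theorem gp_copydetect_spec : Claim_equal_gp_copydetect := by
  intro new_pop parent id_pop _ _
  show gp_copydetect new_pop parent id_pop = gp_copydetect_alt new_pop parent id_pop
  rw [gp_copydetect, gp_copydetect_alt]
  rw [Bool.eq_iff_iff]
  rw [gpLoopA_true_iff parent (PySem.List.pyGetD new_pop id_pop [])]
  exact (alt_true_iff parent (PySem.List.pyGetD new_pop id_pop [])).symm
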